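-- pv_equiv track=rewrite | github.com/cthdarren/SeaOfLights-Human-Detection | praygetest.py | servoPositions
-- ===== SOURCE A (Python) =====
-- ballPos = [[25-x, 16+x, 15-x, 6+x, 5-x] for x in range(5)]
--
-- def translateCoordToBallPos(coord):
--        return ballPos[coord[0]-1][coord[1]-1]
--
-- def servoPositions(coordList):
--     positions = [150 for x in range(25)]
--     if coordList == []:
--         return [150 for x in range(25)]
--     for coord in coordList:
--         mainPos = translateCoordToBallPos(coord)
--         surroundingPos = []
--
--         isFirstCol = coord[1] == 1
--         isLastCol = coord[1] == 5
--         isFirstRow = coord[0] == 1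
--         isLastRow = coord[0] == 5
--         isEvenCol = coord[1] % 2 == 0
--
--         if isEvenCol:
--             if not isFirstRow:
--                 surroundingPos.append(mainPos - 1)
--             if not isLastRow:
--                 surroundingPos.append(mainPos + 1)
--             if not isFirstCol:
--                 surroundingPos.append(mainPos + (1 + 2*(len(ballPos)-coord[0])))
--             if not isLastCol:
--                 surroundingPos.append(mainPos - (1 + 2*(coord[0]-1)))
--
--         elif not isEvenCol:
--             if not isFirstCol:
--                 surroundingPos.append(mainPos + (1 + 2*(coord[0] - 1)))
--             if not isLastCol:
--                 surroundingPos.append(mainPos - (1 + 2*(len(ballPos) - coord[0])))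
--             if not isFirstRow:
--                 surroundingPos.append(mainPos + 1)
--             if not isLastRow:
--                 surroundingPos.append(mainPos - 1)
--
--         for pos in [x-1 for x in surroundingPos]:
--             positions[pos] = 60
--             positions[mainPos - 1] = 0
--         return positions
-- ===== SOURCE B (Python) =====
-- ballPos = [[25-x, 16+x, 15-x, 6+x, 5-x] for x in range(5)]
--
-- def translateCoordToBallPos(coord):
--     return ballPos[coord[0]-1][coord[1]-1]
--
-- def slot(row, col):
--     # closed form of the serpentine layout: ballPos[row-1][col-1] == slot(row, col) on the grid
--     return 5*(5-col) + (6-row if col % 2 else row)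
--
-- def servoPositions(coordList):
--     # Simpler: one loop over the four compass directions, the neighbour's offset
--     # being the serpentine step slot(neighbour)-slot(coord) of the closed-form
--     # layout function, instead of A's two parity-duplicated branch chains.
--     # Only the first coordinate matters (A returns inside its loop).
--     positions = [150] * 25
--     if not coordList:
--         return positions
--     coord = coordList[0]
--     r, c = coord[0], coord[1]
--     m = translateCoordToBallPos(coord)
--     for dr, dc, inside in ((-1, 0, r != 1), (1, 0, r != 5), (0, -1, c != 1), (0, 1, c != 5)):
--         if inside:
--             positions[m + slot(r + dr, c + dc) - slot(r, c) - 1] = 60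
--     positions[m - 1] = 0
--     return positions
-- ===== Notes on version B (the rewrite author's own statement) =====
-- stated objective: simpler
-- what changed: Replaces A's two parity-duplicated branch chains (eight guarded appends of hand-written offset formulas, then a write loop re-writing the 0-slot each iteration) by one loop over the four compass directions whose neighbour offset is the serpentine step slot(neighbour)-slot(coord) of a single closed-form layout function, writing the 0-slot once at the end.
import Mathlib
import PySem

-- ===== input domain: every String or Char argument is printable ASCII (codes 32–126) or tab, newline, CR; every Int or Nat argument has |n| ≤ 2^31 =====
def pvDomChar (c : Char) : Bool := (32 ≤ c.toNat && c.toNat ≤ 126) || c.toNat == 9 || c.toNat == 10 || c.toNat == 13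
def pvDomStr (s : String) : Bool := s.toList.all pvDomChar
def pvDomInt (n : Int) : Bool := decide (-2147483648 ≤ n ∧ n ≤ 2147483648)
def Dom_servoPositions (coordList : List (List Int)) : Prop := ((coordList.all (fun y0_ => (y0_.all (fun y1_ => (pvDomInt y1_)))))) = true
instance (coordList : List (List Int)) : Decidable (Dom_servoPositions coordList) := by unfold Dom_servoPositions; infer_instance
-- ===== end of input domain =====

-- B replaces A's two parity-duplicated branch chains by one loop over the four compass
-- directions, the neighbour offset being the step of a closed-form serpentine layout
-- function, with the 0-slot written once at the end (simpler).

-- ===== PORT A =====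
-- ballPos = [[25-x, 16+x, 15-x, 6+x, 5-x] for x in range(5)]
def pvBallPos : List (List Int) :=
  (PySem.List.pyRange 0 5 1).map (fun x => [25 - x, 16 + x, 15 - x, 6 + x, 5 - x])

-- return ballPos[coord[0]-1][coord[1]-1]   (total via pyGetD; Pre_ keeps indices in range)
def translateCoordToBallPos (coord : List Int) : Int :=
  PySem.List.pyGetD
    (PySem.List.pyGetD pvBallPos (PySem.List.pyGetD coord 0 0 - 1) [])
    (PySem.List.pyGetD coord 1 0 - 1) 0

def servoPositions (coordList : List (List Int)) : List Int :=
  let positions := (PySem.List.pyRange 0 25 1).map (fun _ => (150 : Int))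
  if coordList = [] then (PySem.List.pyRange 0 25 1).map (fun _ => (150 : Int))
  else
    match coordList with
    | [] => positions
    | coord :: _ =>   -- the for-loop body returns unconditionally: only the first coord runs
      let mainPos := translateCoordToBallPos coord
      let c0 := PySem.List.pyGetD coord 0 0
      let c1 := PySem.List.pyGetD coord 1 0
      let isFirstCol := c1 = 1
      let isLastCol := c1 = 5
      let isFirstRow := c0 = 1
      let isLastRow := c0 = 5
      let isEvenCol := PySem.Int.mod c1 2 = 0
      let sp : List Int :=
        if isEvenCol then
          let sp := ([] : List Int)
          let sp := if ¬ isFirstRow then sp ++ [mainPos - 1] else sp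
          let sp := if ¬ isLastRow then sp ++ [mainPos + 1] else sp
          let sp := if ¬ isFirstCol then sp ++ [mainPos + (1 + 2 * ((pvBallPos.length : Int) - c0))] else sp
          if ¬ isLastCol then sp ++ [mainPos - (1 + 2 * (c0 - 1))] else sp
        else
          let sp := ([] : List Int)
          let sp := if ¬ isFirstCol then sp ++ [mainPos + (1 + 2 * (c0 - 1))] else sp
          let sp := if ¬ isLastCol then sp ++ [mainPos - (1 + 2 * ((pvBallPos.length : Int) - c0))] else sp
          let sp := if ¬ isFirstRow then sp ++ [mainPos + 1] else sp
          if ¬ isLastRow then sp ++ [mainPos - 1] else sp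
      (sp.map (fun x => x - 1)).foldl
        (fun positions pos =>
          PySem.List.pySetD (PySem.List.pySetD positions pos 60) (mainPos - 1) 0)
        positions

-- ===== PORT B =====
-- closed form of the serpentine layout: ballPos[row-1][col-1] = pvSlot row col on the grid
def pvSlot (row col : Int) : Int :=
  5 * (5 - col) + (if PySem.Int.mod col 2 ≠ 0 then 6 - row else row)

def servoPositions_alt (coordList : List (List Int)) : List Int :=
  let positions := List.replicate 25 (150 : Int)
  match coordList with
  | [] => positions
  | coord :: _ =>
    let r := PySem.List.pyGetD coord 0 0
    let c := PySem.List.pyGetD coord 1 0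
    let m := translateCoordToBallPos coord
    let dirs : List (Int × Int × Bool) :=
      [(-1, 0, r ≠ 1), (1, 0, r ≠ 5), (0, -1, c ≠ 1), (0, 1, c ≠ 5)]
    let positions := dirs.foldl
      (fun positions d =>
        if d.2.2 then
          PySem.List.pySetD positions (m + pvSlot (r + d.1) (c + d.2.1) - pvSlot r c - 1) 60
        else positions)
      positions
    PySem.List.pySetD positions (m - 1) 0

-- ===== PRECONDITION & SPEC =====
-- The 19 (row, column) pairs of the -4..5 box on which A's surrounding-slot write lands outside
-- the 25-slot table and raises IndexError.
def pvBadPairs : List (Int × Int) :=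
  [(-4, -4), (-4, -2), (-4, 1), (-4, 2), (-3, -4), (-3, -2), (-3, 2), (-2, -4), (-2, -2), (-2, 2),
   (-1, -4), (-1, 2), (0, -4), (0, 2), (1, -4), (2, -4), (3, -4), (4, -3), (5, -3)]

-- Pre_ is exactly the set of inputs on which the Python A returns: the empty list, or a first
-- coordinate of length ≥ 2 whose row and column lie in -4..5 (outside that box ballPos[...]
-- raises IndexError) and are none of the 19 pairs on which a slot write raises IndexError.
def Pre_servoPositions (coordList : List (List Int)) : Prop :=
  coordList = [] ∨
    (2 ≤ (coordList.headD []).length ∧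
     -4 ≤ (coordList.headD []).getD 0 0 ∧ (coordList.headD []).getD 0 0 ≤ 5 ∧
     -4 ≤ (coordList.headD []).getD 1 0 ∧ (coordList.headD []).getD 1 0 ≤ 5 ∧
     ((coordList.headD []).getD 0 0, (coordList.headD []).getD 1 0) ∉ pvBadPairs)
instance (coordList : List (List Int)) : Decidable (Pre_servoPositions coordList) := by
  unfold Pre_servoPositions; infer_instance

def pvWitness_servoPositions : List (List Int) := [[3, 2], [1, 1]]

def Spec_servoPositions (coordList : List (List Int)) (out : List Int) : Prop :=
  out = servoPositions_alt coordList
instance (coordList : List (List Int)) (out : List Int) : Decidable (Spec_servoPositions coordList out) := by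
  unfold Spec_servoPositions; infer_instance

-- ===== CLAIM (what is proved, stated in full; the proofs are below) =====
def Claim_equal_servoPositions : Prop :=
  ∀ (coordList : List (List Int)), Dom_servoPositions coordList →
    Pre_servoPositions coordList → Spec_servoPositions coordList (servoPositions coordList)

-- ===== LEMMAS AND PROOFS =====
lemma pvGetD0 (x y : Int) (t : List Int) (d : Int) :
    PySem.List.pyGetD (x :: y :: t) 0 d = x := by
  have h : (0 : Int) ≤ (t.length : Int) + 1 := by positivity
  simp [PySem.List.pyGetD, PySem.List.pyGet?, PySem.List.pyIdx?, h]

lemma pvGetD1 (x y : Int) (t : List Int) (d : Int) :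
    PySem.List.pyGetD (x :: y :: t) 1 d = y := by
  simp [PySem.List.pyGetD, PySem.List.pyGet?, PySem.List.pyIdx?]

lemma pvEquivOnBox (a b : Int) (t : List Int) (rest : List (List Int))
    (ha1 : -4 ≤ a) (ha5 : a ≤ 5) (hb1 : -4 ≤ b) (hb5 : b ≤ 5)
    (hbad : (a, b) ∉ pvBadPairs) :
    servoPositions ((a :: b :: t) :: rest) = servoPositions_alt ((a :: b :: t) :: rest) := by
  simp only [servoPositions, servoPositions_alt, translateCoordToBallPos, pvGetD0, pvGetD1]
  rw [if_neg (by simp)]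
  interval_cases a <;> interval_cases b <;> revert hbad <;> decide

-- ===== VERDICT (by name: the statement is the Claim_ definition above) =====
theorem servoPositions_spec : Claim_equal_servoPositions := by
  intro coordList _ hpre
  unfold Spec_servoPositions
  match coordList with
  | [] => decide
  | coord :: rest =>
    rcases hpre with h | ⟨hlen, h1, h2, h3, h4, h5⟩
    · exact absurd h (by simp)
    · match coord, hlen with
      | x :: y :: t, _ =>
        simp only [List.headD, List.getD, List.getElem?_cons_zero, List.getElem?_cons_succ,
          Option.getD_some] at h1 h2 h3 h4 h5
        exact pvEquivOnBox x y t rest h1 h2 h3 h4 h5
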